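-- pv_equiv track=rewrite | github.com/madofficer/algorithms | Algorithms_n_DataStructures/graphs/biconnect.py | count_resilient_pairs
-- ===== SOURCE A (Python) =====
-- from collections import defaultdict
--
-- def find_biconnected_components(n, edges):
--     graph = defaultdict(list)
--     for u, v in edges:
--         graph[u].append(v)
--         graph[v].append(u)
--
--     tin = [-1] * n  # время входа в вершину
--     low = [-1] * n  # минимальное достижимое время
--     timer = [0]
--     stack = []
--     biconnected_components = []
--
--     def dfs(v, parent):
--         tin[v] = low[v] = timer[0]
--         timer[0] += 1
--         children = 0
--
--         for to in graph[v]: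
--             if to == parent:
--                 continue
--             if tin[to] != -1:  # назад по дереву
--                 low[v] = min(low[v], tin[to])
--             else:
--                 stack.append((v, to))
--                 dfs(to, v)
--                 low[v] = min(low[v], low[to])
--                 if low[to] >= tin[v]:
--                     # Мы нашли двусвязную компоненту
--                     component = []
--                     while stack:
--                         edge = stack.pop()
--                         component.append(edge)
--                         if edge == (v, to):
--                             break
--                     biconnected_components.append(component)
--                 children += 1
--
--     for i in range(n):
--         if tin[i] == -1:
--             dfs(i, -1)
--
--     return biconnected_components
--
-- def count_resilient_pairs(n, edges):
--     biconnected_components = find_biconnected_components(n, edges)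
--     count = 0
--
--     for component in biconnected_components:
--         nodes = set()
--         for u, v in component:
--             nodes.add(u)
--             nodes.add(v)
--         size = len(nodes)
--         count += size * (size - 1) // 2  # Все пары в компоненте связаны
--
--     return count
-- ===== SOURCE B (Python) =====
-- from collections import defaultdict
--
--
-- def count_resilient_pairs(n, edges):
--     # Iterative (explicit work-stack) biconnected-components DFS instead of recursion.
--     graph = defaultdict(list)
--     for u, v in edges:
--         graph[u].append(v)
--         graph[v].append(u)
--
--     tin = [-1] * n
--     low = [-1] * n
--     timer = 0
--     estack = []
--     comps = []
--
--     for i in range(n):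
--         if tin[i] != -1:
--             continue
--         tin[i] = low[i] = timer
--         timer += 1
--         frames = [(i, -1, None, list(graph[i]))]
--         while frames:
--             v, p, pend, rest = frames[-1]
--             if pend is not None:
--                 # a child subtree just finished: propagate low and maybe cut a component
--                 low[v] = min(low[v], low[pend])
--                 if low[pend] >= tin[v]:
--                     comp = []
--                     while estack:
--                         e = estack.pop()
--                         comp.append(e)
--                         if e == (v, pend):
--                             break
--                     comps.append(comp)
--                 frames[-1] = (v, p, None, rest)
--             elif not rest:
--                 frames.pop()
--             else:
--                 to = rest[0]
--                 if to == p: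
--                     frames[-1] = (v, p, None, rest[1:])
--                 elif tin[to] != -1:
--                     low[v] = min(low[v], tin[to])
--                     frames[-1] = (v, p, None, rest[1:])
--                 else:
--                     estack.append((v, to))
--                     tin[to] = low[to] = timer
--                     timer += 1
--                     frames[-1] = (v, p, to, rest[1:])
--                     frames.append((to, v, None, list(graph[to])))
--
--     count = 0
--     for comp in comps:
--         nodes = set()
--         for u, v in comp:
--             nodes.add(u)
--             nodes.add(v)
--         size = len(nodes)
--         count += size * (size - 1) // 2
--     return count
-- ===== Notes on version B (the rewrite author's own statement) =====
-- stated objective: alternative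
-- what changed: The recursive biconnected-components DFS is replaced by an explicit iterative DFS over a work stack of (vertex, parent, pending-child, remaining-neighbours) frames, applying the identical tin/low updates, edge stack and component cuts, then counting pairs the same way.
-- outside the precondition, e.g. on count_resilient_pairs(2, [(5, 7)]): A returns 0, B returns 0; on count_resilient_pairs(2, [(0, 5)]): A raises IndexError, B raises IndexError; on count_resilient_pairs(3, [(0, 1), (1, 5)]): A raises IndexError, B raises IndexError
import Mathlib
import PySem

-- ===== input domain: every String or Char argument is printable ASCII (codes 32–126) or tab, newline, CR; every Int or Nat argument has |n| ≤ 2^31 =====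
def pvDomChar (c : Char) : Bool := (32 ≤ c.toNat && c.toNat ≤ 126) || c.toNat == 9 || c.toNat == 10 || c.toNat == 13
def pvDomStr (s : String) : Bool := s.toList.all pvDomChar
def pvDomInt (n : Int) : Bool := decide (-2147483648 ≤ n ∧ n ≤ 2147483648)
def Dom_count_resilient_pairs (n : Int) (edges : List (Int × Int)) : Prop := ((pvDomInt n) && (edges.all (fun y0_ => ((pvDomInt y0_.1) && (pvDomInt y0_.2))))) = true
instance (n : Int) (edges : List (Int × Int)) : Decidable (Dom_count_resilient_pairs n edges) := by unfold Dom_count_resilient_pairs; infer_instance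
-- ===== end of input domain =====

-- B replaces A's recursive biconnected-components DFS by an explicit work-stack iterative DFS
-- (same tin/low updates, same edge stack, same component cuts); objective: alternative decomposition.

-- ===== PORT A =====
-- Shared state of both Pythons: tin/low arrays, the timer, the edge stack, the collected components.
structure PvSt where
  tin : List Int
  low : List Int
  timer : Int
  est : List (Int × Int)
  comps : List (List (Int × Int))
deriving Repr, DecidableEq

-- graph = defaultdict(list); graph[u].append(v); graph[v].append(u)
def pvGStep (g : PySem.Dict Int (List Int)) (e : Int × Int) : PySem.Dict Int (List Int) :=
  (g.modify e.1 [] (· ++ [e.2])).modify e.2 [] (· ++ [e.1])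

def pvGraph (edges : List (Int × Int)) : PySem.Dict Int (List Int) :=
  edges.foldl pvGStep PySem.Dict.empty

-- graph[v] (defaultdict read: missing key gives [])
def pvNbrs (g : PySem.Dict Int (List Int)) (v : Int) : List Int := g.getD v []

-- xs[i] / xs[i] = x with Python index semantics (exact on Pre_, where every index is valid)
def pvGet (l : List Int) (i : Int) : Int := PySem.List.pyGetD l i (-1)
def pvSet (l : List Int) (i : Int) (x : Int) : List Int := PySem.List.pySetD l i x

-- tin[v] = low[v] = timer[0]; timer[0] += 1
def pvEnter (v : Int) (s : PvSt) : PvSt :=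
  { s with tin := pvSet s.tin v s.timer, low := pvSet s.low v s.timer, timer := s.timer + 1 }

-- back edge: low[v] = min(low[v], tin[tw])
def pvBack (v tw : Int) (s : PvSt) : PvSt :=
  { s with low := pvSet s.low v (min (pvGet s.low v) (pvGet s.tin tw)) }

-- pop edges until (v, tw) inclusive: the component, and the remaining stack
def pvPopComp (t : Int × Int) : List (Int × Int) → List (Int × Int) × List (Int × Int)
  | [] => ([], [])
  | e :: st =>
    if e = t then ([e], st)
    else
      let r := pvPopComp t st
      (e :: r.1, r.2)

-- after a child returns: low[v] = min(low[v], low[tw]); if low[tw] >= tin[v]: cut a component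
def pvAfter (v tw : Int) (s : PvSt) : PvSt :=
  let s1 : PvSt := { s with low := pvSet s.low v (min (pvGet s.low v) (pvGet s.low tw)) }
  if pvGet s1.low tw ≥ pvGet s1.tin v then
    { s1 with est := (pvPopComp (v, tw) s1.est).2,
              comps := s1.comps ++ [(pvPopComp (v, tw) s1.est).1] }
  else s1

def pvInit (n : Int) : PvSt :=
  ⟨List.replicate n.toNat (-1), List.replicate n.toNat (-1), 0, [], []⟩

-- count += size*(size-1)//2 over the per-component node sets
def pvCount (comps : List (List (Int × Int))) : Int :=
  comps.foldl (fun c comp =>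
    let nodes := comp.foldl (fun (nd : PySem.Set Int) e => PySem.Set.add (PySem.Set.add nd e.1) e.2)
      PySem.Set.empty
    c + PySem.Int.floordiv (PySem.Set.len nodes * (PySem.Set.len nodes - 1)) 2) 0

-- A's recursive dfs(v, parent); the Nat argument is recursion fuel (n.toNat suffices on Pre_:
-- each nested call enters a vertex whose tin slot was -1).
mutual
def pvDfsA (g : PySem.Dict Int (List Int)) : Nat → Int → Int → PvSt → PvSt
  | 0, _, _, s => s
  | f+1, v, p, s => pvGoA g f v p (pvNbrs g v) (pvEnter v s)
  termination_by f _ _ _ => (f, 0)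

def pvGoA (g : PySem.Dict Int (List Int)) (f : Nat) (v p : Int) : List Int → PvSt → PvSt
  | [], s => s
  | tw :: rest, s =>
    if tw = p then pvGoA g f v p rest s
    else if pvGet s.tin tw ≠ -1 then pvGoA g f v p rest (pvBack v tw s)
    else
      pvGoA g f v p rest
        (pvAfter v tw (pvDfsA g f tw v { s with est := (v, tw) :: s.est }))
  termination_by l _ => (f, l.length + 1)
end

def count_resilient_pairs (n : Int) (edges : List (Int × Int)) : Int :=
  let g := pvGraph edges
  let s := (PySem.List.pyRange 0 n 1).foldl
    (fun s i => if pvGet s.tin i = -1 then pvDfsA g n.toNat i (-1) s else s) (pvInit n)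
  pvCount s.comps

-- ===== PORT B =====
-- B: explicit work stack of frames (v, parent, pending child, remaining neighbours).
abbrev PvFrame : Type := Int × Int × Option Int × List Int

-- one iteration of Source B's `while frames:` loop; none = frames empty (loop ends)
def pvStep (g : PySem.Dict Int (List Int)) :
    List PvFrame × PvSt → Option (List PvFrame × PvSt)
  | ([], _) => none
  | ((v, p, some tw, rest) :: fs, s) => some ((v, p, none, rest) :: fs, pvAfter v tw s)
  | ((_, _, none, []) :: fs, s) => some (fs, s)
  | ((v, p, none, tw :: rest) :: fs, s) =>
    if tw = p then some ((v, p, none, rest) :: fs, s)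
    else if pvGet s.tin tw ≠ -1 then some ((v, p, none, rest) :: fs, pvBack v tw s)
    else some ((tw, v, none, pvNbrs g tw) :: (v, p, some tw, rest) :: fs,
               pvEnter tw { s with est := (v, tw) :: s.est })

-- run the while-loop; the Nat is fuel (a pure termination device: pvPsi below is proved
-- tw bound the number of loop iterations on Pre_, and the loop stops at the empty stack)
def pvRun (g : PySem.Dict Int (List Int)) :
    Nat → List PvFrame × PvSt → List PvFrame × PvSt
  | 0, c => c
  | f+1, c =>
    match pvStep g c with
    | none => c
    | some c' => pvRun g f c'

-- iteration bound: L = max neighbour-list length (2*len(edges)), f = DFS depth bound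
def pvPsi (L : Nat) : Nat → Nat
  | 0 => 0
  | f+1 => 1 + L * (2 + pvPsi L f)

def count_resilient_pairs_alt (n : Int) (edges : List (Int × Int)) : Int :=
  let g := pvGraph edges
  let s := (PySem.List.pyRange 0 n 1).foldl
    (fun s i =>
      if pvGet s.tin i = -1 then
        (pvRun g (pvPsi (2 * edges.length) n.toNat) ([(i, -1, none, pvNbrs g i)], pvEnter i s)).2
      else s) (pvInit n)
  pvCount s.comps

-- ===== PRECONDITION & SPEC =====
-- Pre_ excludes (for n > 0) edge lists with an endpoint outside [-n, n): there A's list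
-- indexing tin[tw] raises IndexError as soon as the DFS reaches such a vertex, and when the
-- DFS happens not tw reach it A merely ignores that edge (both programs still agree there,
-- but "the DFS reaches it" is not a closed-form condition on the input).
def Pre_count_resilient_pairs (n : Int) (edges : List (Int × Int)) : Prop :=
  n ≤ 0 ∨ ∀ e ∈ edges, ((-n ≤ e.1 ∧ e.1 < n) ∧ (-n ≤ e.2 ∧ e.2 < n))
instance (n : Int) (edges : List (Int × Int)) : Decidable (Pre_count_resilient_pairs n edges) := by
  unfold Pre_count_resilient_pairs; infer_instance

def pvWitness_count_resilient_pairs : Int × (List (Int × Int)) := (4, [(0, 1), (1, 2), (2, 0), (2, 3)])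

def Spec_count_resilient_pairs (n : Int) (edges : List (Int × Int)) (out : Int) : Prop := out = count_resilient_pairs_alt n edges
instance (n : Int) (edges : List (Int × Int)) (out : Int) : Decidable (Spec_count_resilient_pairs n edges out) := by unfold Spec_count_resilient_pairs; infer_instance

-- ===== CLAIM (what is proved, stated in full; the proofs are below) =====
def Claim_equal_count_resilient_pairs : Prop := ∀ (n : Int) (edges : List (Int × Int)), Dom_count_resilient_pairs n edges → Pre_count_resilient_pairs n edges → Spec_count_resilient_pairs n edges (count_resilient_pairs n edges)

-- ===== LEMMAS AND PROOFS =====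

-- exact-step execution of B's loop: `some c'` = after exactly k iterations the config is c'
def pvIter (g : PySem.Dict Int (List Int)) :
    Nat → List PvFrame × PvSt → Option (List PvFrame × PvSt)
  | 0, c => some c
  | k+1, c => (pvStep g c).bind (pvIter g k)

lemma pvIter_add (g : PySem.Dict Int (List Int)) (a b : Nat) (c : List PvFrame × PvSt) :
    pvIter g (a + b) c = (pvIter g a c).bind (pvIter g b) := by
  induction a generalizing c with
  | zero => simp [pvIter]
  | succ a ih =>
    have : a + 1 + b = (a + b) + 1 := by omega
    rw [this]
    simp only [pvIter]
    cases pvStep g c with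
    | none => simp
    | some c' => simp [ih]

lemma pvRun_stuck (g : PySem.Dict Int (List Int)) (F : Nat) (c : List PvFrame × PvSt)
    (h : pvStep g c = none) : pvRun g F c = c := by
  cases F with
  | zero => rfl
  | succ F => simp [pvRun, h]

lemma pvRun_of_iter (g : PySem.Dict Int (List Int)) :
    ∀ (k F : Nat) (c c' : List PvFrame × PvSt), pvIter g k c = some c' →
      pvStep g c' = none → k ≤ F → pvRun g F c = c' := by
  intro k
  induction k with
  | zero =>
    intro F c c' h hstop _
    simp [pvIter] at h
    subst h
    exact pvRun_stuck g F c hstop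
  | succ k ih =>
    intro F c c' h hstop hle
    simp only [pvIter] at h
    cases hs : pvStep g c with
    | none => rw [hs] at h; simp at h
    | some c1 =>
      rw [hs] at h
      simp at h
      obtain ⟨F', rfl⟩ : ∃ F', F = F' + 1 := ⟨F - 1, by omega⟩
      simp [pvRun, hs]
      exact ih F' c1 c' h hstop (by omega)

-- the state invariant: array lengths and a nonnegative timer
def pvInv (N : Nat) (s : PvSt) : Prop :=
  s.tin.length = N ∧ s.low.length = N ∧ 0 ≤ s.timer

-- number of still-unvisited slots
def pvU (s : PvSt) : Nat := s.tin.countP (· = -1)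

lemma pvIdx_some {N : Nat} {i : Int} (h : PySem.Raise.InRange N i) :
    ∃ k, PySem.List.pyIdx? N i = some k ∧ k < N := by
  obtain ⟨h1, h2⟩ := h
  unfold PySem.List.pyIdx?
  by_cases h3 : 0 ≤ i
  · rw [if_pos h3, if_pos h2]
    exact ⟨i.toNat, rfl, by omega⟩
  · rw [if_neg h3, if_pos h1]
    refine ⟨N - (-i).toNat, rfl, ?_⟩
    have : 1 ≤ (-i).toNat := by omega
    omega

lemma pvGet_eq {l : List Int} {i : Int} {k : Nat}
    (hk : PySem.List.pyIdx? l.length i = some k) (hkl : k < l.length) :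
    pvGet l i = l[k] := by
  simp [pvGet, PySem.List.pyGetD, PySem.List.pyGet?, hk, List.getElem?_eq_getElem hkl]

lemma pvSet_eq {l : List Int} {i : Int} {k : Nat} (x : Int)
    (hk : PySem.List.pyIdx? l.length i = some k) :
    pvSet l i x = l.set k x := by
  simp [pvSet, PySem.List.pySetD, PySem.List.pySet?, hk]

lemma pvU_pos {s : PvSt} {i : Int} (h : PySem.Raise.InRange s.tin.length i)
    (hv : pvGet s.tin i = -1) : 1 ≤ pvU s := by
  have hm := PySem.List.pyGetD_mem s.tin (-1) h
  rw [show PySem.List.pyGetD s.tin i (-1) = pvGet s.tin i from rfl, hv] at hm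
  exact List.countP_pos_iff.mpr ⟨-1, hm, by decide⟩

lemma pvU_enter {N : Nat} {s : PvSt} {i : Int} (hInv : pvInv N s)
    (h : PySem.Raise.InRange N i) (hv : pvGet s.tin i = -1) :
    pvU (pvEnter i s) + 1 = pvU s := by
  obtain ⟨hlen, _, htimer⟩ := hInv
  obtain ⟨k, hk, hkN⟩ := pvIdx_some h
  rw [← hlen] at hk
  have hkl : k < s.tin.length := by omega
  have hget : s.tin[k] = -1 := by rw [← pvGet_eq hk hkl]; exact hv
  have hpos : 1 ≤ pvU s := pvU_pos (by rw [hlen]; exact h) hv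
  have htin : (pvEnter i s).tin = s.tin.set k s.timer := pvSet_eq s.timer hk
  unfold pvU at hpos ⊢
  rw [htin, List.countP_set hkl, hget]
  rw [if_pos (by simp), if_neg (by simp; omega)]
  omega

-- invariant preservation by the shared state operations
lemma pvInv_enter {N : Nat} {s : PvSt} (i : Int) (hInv : pvInv N s) : pvInv N (pvEnter i s) := by
  obtain ⟨h1, h2, h3⟩ := hInv
  exact ⟨by simp [pvEnter, pvSet, PySem.List.length_pySetD, h1],
         by simp [pvEnter, pvSet, PySem.List.length_pySetD, h2], by simp [pvEnter]; omega⟩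

lemma pvInv_back {N : Nat} {s : PvSt} (v tw : Int) (hInv : pvInv N s) : pvInv N (pvBack v tw s) := by
  obtain ⟨h1, h2, h3⟩ := hInv
  exact ⟨h1, by simp [pvBack, pvSet, PySem.List.length_pySetD, h2], h3⟩

lemma pvAfter_tin (v tw : Int) (s : PvSt) : (pvAfter v tw s).tin = s.tin := by
  simp only [pvAfter]
  split <;> rfl

lemma pvAfter_timer (v tw : Int) (s : PvSt) : (pvAfter v tw s).timer = s.timer := by
  simp only [pvAfter]
  split <;> rfl

lemma pvAfter_low_length (v tw : Int) (s : PvSt) :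
    (pvAfter v tw s).low.length = s.low.length := by
  simp only [pvAfter]
  split <;> simp [pvSet, PySem.List.length_pySetD]

lemma pvInv_after {N : Nat} {s : PvSt} (v tw : Int) (hInv : pvInv N s) :
    pvInv N (pvAfter v tw s) := by
  obtain ⟨h1, h2, h3⟩ := hInv
  exact ⟨by rw [pvAfter_tin]; exact h1, by rw [pvAfter_low_length]; exact h2,
         by rw [pvAfter_timer]; exact h3⟩

lemma pvU_back (v tw : Int) (s : PvSt) : pvU (pvBack v tw s) = pvU s := rfl

lemma pvU_after (v tw : Int) (s : PvSt) : pvU (pvAfter v tw s) = pvU s := by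
  unfold pvU
  rw [pvAfter_tin]

-- the built graph: every neighbour is an edge endpoint, lists are short
lemma pvNbrs_modify (d : PySem.Dict Int (List Int)) (k v : Int) (f : List Int → List Int) :
    pvNbrs (d.modify k [] f) v = if v = k then f (pvNbrs d k) else pvNbrs d v := by
  simp [pvNbrs, PySem.Dict.modify, PySem.Dict.getD_insert]

lemma pvGraph_fold (edges : List (Int × Int)) :
    ∀ (d : PySem.Dict Int (List Int)) (v : Int),
      (∀ x ∈ pvNbrs (edges.foldl pvGStep d) v,
        x ∈ pvNbrs d v ∨ ∃ e ∈ edges, x = e.1 ∨ x = e.2) ∧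
      (pvNbrs (edges.foldl pvGStep d) v).length ≤ (pvNbrs d v).length + 2 * edges.length := by
  induction edges with
  | nil => intro d v; simp
  | cons e rest ih =>
    intro d v
    obtain ⟨ihm, ihl⟩ := ih (pvGStep d e) v
    have hstep : ∀ w : Int, (∀ x ∈ pvNbrs (pvGStep d e) w, x ∈ pvNbrs d w ∨ x = e.1 ∨ x = e.2) ∧
        (pvNbrs (pvGStep d e) w).length ≤ (pvNbrs d w).length + 2 := by
      intro w
      simp only [pvGStep, pvNbrs_modify]
      constructor
      · intro x hx
        split_ifs at hx <;> simp_all [List.mem_append] <;> tauto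
      · split_ifs <;> simp_all
    constructor
    · intro x hx
      rcases ihm x (by simpa using hx) with hx' | hx'
      · rcases (hstep v).1 x hx' with h | h
        · exact Or.inl h
        · exact Or.inr ⟨e, List.mem_cons_self .., h⟩
      · obtain ⟨e', he', h⟩ := hx'
        exact Or.inr ⟨e', List.mem_cons_of_mem _ he', h⟩
    · have := (hstep v).2
      simp only [List.foldl_cons] at *
      calc (pvNbrs (rest.foldl pvGStep (pvGStep d e)) v).length
          ≤ (pvNbrs (pvGStep d e) v).length + 2 * rest.length := ihl
        _ ≤ (pvNbrs d v).length + 2 + 2 * rest.length := by omega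
        _ = (pvNbrs d v).length + 2 * (rest.length + 1) := by ring

lemma pvGood_of_pre {n : Int} (edges : List (Int × Int)) (hn : 0 < n)
    (hpre : ∀ e ∈ edges, ((-n ≤ e.1 ∧ e.1 < n) ∧ (-n ≤ e.2 ∧ e.2 < n))) :
    ∀ v : Int, (∀ x ∈ pvNbrs (pvGraph edges) v, PySem.Raise.InRange n.toNat x) ∧
      (pvNbrs (pvGraph edges) v).length ≤ 2 * edges.length := by
  intro v
  obtain ⟨hm, hl⟩ := pvGraph_fold edges PySem.Dict.empty v
  have hemp : pvNbrs (PySem.Dict.empty : PySem.Dict Int (List Int)) v = [] := rfl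
  constructor
  · intro x hx
    rcases hm x hx with h | ⟨e, he, h⟩
    · rw [hemp] at h; simp at h
    · have := hpre e he
      have hcast : ((n.toNat : Int)) = n := by omega
      constructor <;> rw [hcast] <;> rcases h with h | h <;> subst h <;> omega
  · rw [hemp] at hl; simpa using hl

-- ==== the simulation: B's loop executes A's recursion step for step ====

lemma pvIter_succ (g : PySem.Dict Int (List Int)) (k : Nat) (c : List PvFrame × PvSt) :
    pvIter g (k + 1) c = (pvStep g c).bind (pvIter g k) := rfl

lemma pvSim (g : PySem.Dict Int (List Int)) (N L : Nat)
    (hg : ∀ v : Int, (∀ x ∈ pvNbrs g v, PySem.Raise.InRange N x) ∧ (pvNbrs g v).length ≤ L) :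
    ∀ f : Nat, ∀ (l : List Int) (v p : Int) (s : PvSt) (fs : List PvFrame),
      pvInv N s → (∀ x ∈ l, PySem.Raise.InRange N x) → pvU s ≤ f →
      ∃ k, k ≤ 1 + l.length * (2 + pvPsi L f) ∧
        pvIter g k ((v, p, none, l) :: fs, s) = some (fs, pvGoA g f v p l s) ∧
        pvInv N (pvGoA g f v p l s) ∧ pvU (pvGoA g f v p l s) ≤ pvU s := by
  intro f
  induction f using Nat.strong_induction_on with
  | _ f IHf =>
    intro l
    induction l with
    | nil =>
      intro v p s fs hInv hl hU
      have hgo : pvGoA g f v p [] s = s := by simp [pvGoA]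
      refine ⟨1, by simp, ?_, by rw [hgo]; exact hInv, by rw [hgo]⟩
      rw [hgo, pvIter_succ]
      rfl
    | cons tw rest IHl =>
      intro v p s fs hInv hl hU
      have htw : PySem.Raise.InRange N tw := hl tw (List.mem_cons_self ..)
      have hrest : ∀ x ∈ rest, PySem.Raise.InRange N x :=
        fun x hx => hl x (List.mem_cons_of_mem _ hx)
      by_cases h1 : tw = p
      · obtain ⟨k2, hk2, hit2, hinv2, hU2⟩ := IHl v p s fs hInv hrest hU
        have hgo : pvGoA g f v p (tw :: rest) s = pvGoA g f v p rest s := by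
          simp [pvGoA, h1]
        have hstep : pvStep g ((v, p, none, tw :: rest) :: fs, s)
            = some ((v, p, none, rest) :: fs, s) := by
          simp [pvStep, h1]
        refine ⟨k2 + 1, ?_, ?_, by rw [hgo]; exact hinv2, by rw [hgo]; exact hU2⟩
        · have hx : 1 + (tw :: rest).length * (2 + pvPsi L f)
              = (1 + rest.length * (2 + pvPsi L f)) + (2 + pvPsi L f) := by
            simp [List.length_cons]; ring
          omega
        · rw [pvIter_succ, hstep, Option.bind_some, hit2, hgo]
      · by_cases h2 : pvGet s.tin tw = -1
        · -- tree edge: push (v, tw), recurse into tw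
          have hInv1 : pvInv N { s with est := (v, tw) :: s.est } := hInv
          have hU1 : 1 ≤ pvU s := pvU_pos (by rw [hInv.1]; exact htw) h2
          obtain ⟨f', rfl⟩ : ∃ f', f = f' + 1 := ⟨f - 1, by omega⟩
          have hUe : pvU (pvEnter tw { s with est := (v, tw) :: s.est }) + 1 = pvU s :=
            pvU_enter hInv1 htw h2
          obtain ⟨k1, hk1, hit1, hinvr, hUr⟩ :=
            IHf f' (by omega) (pvNbrs g tw) tw v
              (pvEnter tw { s with est := (v, tw) :: s.est })
              ((v, p, some tw, rest) :: fs)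
              (pvInv_enter tw hInv1) (fun x hx => (hg tw).1 x hx) (by omega)
          set r := pvGoA g f' tw v (pvNbrs g tw)
            (pvEnter tw { s with est := (v, tw) :: s.est }) with hr
          have hdfs : pvDfsA g (f' + 1) tw v { s with est := (v, tw) :: s.est } = r := by
            rw [hr]; simp [pvDfsA]
          have hUafter : pvU (pvAfter v tw r) ≤ pvU s - 1 := by
            rw [pvU_after]; omega
          obtain ⟨k2, hk2, hit2, hinv2, hU2⟩ :=
            IHl v p (pvAfter v tw r) fs (pvInv_after v tw hinvr) hrest (by omega)
          have hgo : pvGoA g (f' + 1) v p (tw :: rest) s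
              = pvGoA g (f' + 1) v p rest (pvAfter v tw r) := by
            rw [← hdfs]
            simp [pvGoA, h1, h2]
          have hstep1 : pvStep g ((v, p, none, tw :: rest) :: fs, s)
              = some ((tw, v, none, pvNbrs g tw) :: (v, p, some tw, rest) :: fs,
                      pvEnter tw { s with est := (v, tw) :: s.est }) := by
            simp [pvStep, h1, h2]
          have hstep2 : pvStep g ((v, p, some tw, rest) :: fs, r)
              = some ((v, p, none, rest) :: fs, pvAfter v tw r) := rfl
          refine ⟨k1 + k2 + 2, ?_, ?_, by rw [hgo]; exact hinv2, by rw [hgo]; omega⟩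
          · have hk1' : k1 ≤ pvPsi L (f' + 1) := by
              have h3 : (pvNbrs g tw).length * (2 + pvPsi L f') ≤ L * (2 + pvPsi L f') :=
                Nat.mul_le_mul (hg tw).2 le_rfl
              calc k1 ≤ 1 + (pvNbrs g tw).length * (2 + pvPsi L f') := hk1
                _ ≤ 1 + L * (2 + pvPsi L f') := by omega
                _ = pvPsi L (f' + 1) := rfl
            have hx : 1 + (tw :: rest).length * (2 + pvPsi L (f' + 1))
                = (1 + rest.length * (2 + pvPsi L (f' + 1))) + (2 + pvPsi L (f' + 1)) := by
              simp [List.length_cons]; ring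
            omega
          · rw [show k1 + k2 + 2 = (k1 + (1 + k2)) + 1 by omega]
            rw [pvIter_succ, hstep1, Option.bind_some, pvIter_add, hit1, Option.bind_some]
            rw [show 1 + k2 = k2 + 1 by omega, pvIter_succ, hstep2, Option.bind_some]
            rw [hit2, hgo]
        · -- back edge: low[v] = min(low[v], tin[tw])
          obtain ⟨k2, hk2, hit2, hinv2, hU2⟩ :=
            IHl v p (pvBack v tw s) fs (pvInv_back v tw hInv) hrest
              (by rw [pvU_back]; exact hU)
          have hgo : pvGoA g f v p (tw :: rest) s = pvGoA g f v p rest (pvBack v tw s) := by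
            simp [pvGoA, h1, h2]
          have hstep : pvStep g ((v, p, none, tw :: rest) :: fs, s)
              = some ((v, p, none, rest) :: fs, pvBack v tw s) := by
            simp [pvStep, h1, h2]
          refine ⟨k2 + 1, ?_, ?_, by rw [hgo]; exact hinv2,
            by rw [hgo, ← pvU_back v tw s]; exact hU2⟩
          · have hx : 1 + (tw :: rest).length * (2 + pvPsi L f)
                = (1 + rest.length * (2 + pvPsi L f)) + (2 + pvPsi L f) := by
              simp [List.length_cons]; ring
            omega
          · rw [pvIter_succ, hstep, Option.bind_some, hit2, hgo]

-- one full root call: B's machine run equals A's dfs(v, -1)-style call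
lemma pvMain (g : PySem.Dict Int (List Int)) (N L : Nat)
    (hg : ∀ v : Int, (∀ x ∈ pvNbrs g v, PySem.Raise.InRange N x) ∧ (pvNbrs g v).length ≤ L)
    (f : Nat) (v p : Int) (s : PvSt) (hInv : pvInv N s)
    (hv : PySem.Raise.InRange N v) (htin : pvGet s.tin v = -1) (hU : pvU s ≤ f) :
    ∃ k, k ≤ pvPsi L f ∧
      pvIter g k ([(v, p, none, pvNbrs g v)], pvEnter v s) = some ([], pvDfsA g f v p s) ∧
      pvInv N (pvDfsA g f v p s) ∧ pvU (pvDfsA g f v p s) + 1 ≤ pvU s := by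
  have hpos : 1 ≤ pvU s := pvU_pos (by rw [hInv.1]; exact hv) htin
  obtain ⟨f', rfl⟩ : ∃ f', f = f' + 1 := ⟨f - 1, by omega⟩
  have hUe : pvU (pvEnter v s) + 1 = pvU s := pvU_enter hInv hv htin
  obtain ⟨k, hk, hiter, hinv', hU'⟩ :=
    pvSim g N L hg f' (pvNbrs g v) v p (pvEnter v s) [] (pvInv_enter v hInv)
      (fun x hx => (hg v).1 x hx) (by omega)
  have hdfs : pvDfsA g (f' + 1) v p s = pvGoA g f' v p (pvNbrs g v) (pvEnter v s) := by
    simp [pvDfsA]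
  refine ⟨k, ?_, ?_, ?_, ?_⟩
  · calc k ≤ 1 + (pvNbrs g v).length * (2 + pvPsi L f') := hk
      _ ≤ 1 + L * (2 + pvPsi L f') := by
          have h2 : (pvNbrs g v).length * (2 + pvPsi L f') ≤ L * (2 + pvPsi L f') :=
            Nat.mul_le_mul (hg v).2 le_rfl
          omega
      _ = pvPsi L (f' + 1) := rfl
  · rw [hdfs]
    exact hiter
  · rw [hdfs]
    exact hinv'
  · rw [hdfs]
    omega

-- the driver loop: per root, B's machine value is A's recursive value
lemma pvDriver (g : PySem.Dict Int (List Int)) (N L : Nat) (F : Nat) (hF : pvPsi L N ≤ F)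
    (hg : ∀ v : Int, (∀ x ∈ pvNbrs g v, PySem.Raise.InRange N x) ∧ (pvNbrs g v).length ≤ L) :
    ∀ (l : List Int) (s : PvSt), pvInv N s → (∀ i ∈ l, PySem.Raise.InRange N i) →
      (l.foldl (fun s i =>
          if pvGet s.tin i = -1 then (pvRun g F ([(i, -1, none, pvNbrs g i)], pvEnter i s)).2
          else s) s)
      = (l.foldl (fun s i => if pvGet s.tin i = -1 then pvDfsA g N i (-1) s else s) s) ∧
      pvInv N (l.foldl (fun s i => if pvGet s.tin i = -1 then pvDfsA g N i (-1) s else s) s) := by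
  intro l
  induction l with
  | nil => intro s hInv _; exact ⟨rfl, hInv⟩
  | cons i l ih =>
    intro s hInv hl
    simp only [List.foldl_cons]
    by_cases hguard : pvGet s.tin i = -1
    · rw [if_pos hguard, if_pos hguard]
      have hU : pvU s ≤ N := by
        have := List.countP_le_length (p := (· = -1)) (l := s.tin)
        rw [hInv.1] at this
        exact this
      obtain ⟨k, hk, hiter, hinv', _⟩ :=
        pvMain g N L hg N i (-1) s hInv (hl i (List.mem_cons_self ..)) hguard hU
      have hrun : pvRun g F ([(i, -1, none, pvNbrs g i)], pvEnter i s) = ([], pvDfsA g N i (-1) s) :=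
        pvRun_of_iter g k F _ _ hiter rfl (by omega)
      rw [hrun]
      exact ih (pvDfsA g N i (-1) s) hinv' (fun j hj => hl j (List.mem_cons_of_mem _ hj))
    · rw [if_neg hguard, if_neg hguard]
      exact ih s hInv (fun j hj => hl j (List.mem_cons_of_mem _ hj))

-- ===== VERDICT (by name: the statement is the Claim_ definition above) =====
theorem count_resilient_pairs_spec : Claim_equal_count_resilient_pairs := by
  intro n edges _ hpre
  unfold Spec_count_resilient_pairs count_resilient_pairs count_resilient_pairs_alt
  dsimp only
  by_cases hn : n ≤ 0
  · rw [PySem.List.pyRange_one_eq_nil (by omega : n ≤ 0)]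
    rfl
  · have hn' : 0 < n := by omega
    have hpre' : ∀ e ∈ edges, ((-n ≤ e.1 ∧ e.1 < n) ∧ (-n ≤ e.2 ∧ e.2 < n)) := by
      rcases hpre with h | h
      · omega
      · exact h
    have hg := pvGood_of_pre edges hn' hpre'
    have hinit : pvInv n.toNat (pvInit n) := by
      refine ⟨?_, ?_, ?_⟩ <;> simp [pvInit]
    have hmem : ∀ i ∈ PySem.List.pyRange 0 n 1, PySem.Raise.InRange n.toNat i := by
      intro i hi
      rw [PySem.List.mem_pyRange_one] at hi
      constructor <;> omega
    have := pvDriver (pvGraph edges) n.toNat (2 * edges.length) (pvPsi (2 * edges.length) n.toNat)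
      le_rfl hg (PySem.List.pyRange 0 n 1) (pvInit n) hinit hmem
    rw [this.1]
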